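-- pv_equiv track=rewrite | github.com/kkrusere/NHANES-Data-Visualization-Dashboard-on-Health-Disparities-and-Inequities | NHANES_data_API.py | check_in_between_cycle
-- ===== SOURCE A (Python) =====
-- def check_in_between_cycle(start_year, end_year, cycle_list):
--     """
--     Check for valid cycles within a range.
--
--     Args:
--     start_year (str): The start year of the range.
--     end_year (str): The end year of the range.
--     cycle_list (list): List of available cycle years.
--
--     Returns:
--     list: List of valid cycle(s) within the range.
--     """
--     list_of_cycles_to_be_worked_on = []
--     flager = 0
--     for cycle in cycle_list:
--         if start_year in cycle:
--             flager = 1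
--         if flager == 1:
--             list_of_cycles_to_be_worked_on.append(cycle)
--         if end_year in cycle:
--             return list_of_cycles_to_be_worked_on
--     return list_of_cycles_to_be_worked_on
-- ===== SOURCE B (Python) =====
-- def check_in_between_cycle(start_year, end_year, cycle_list):
--     s = next((i for i, c in enumerate(cycle_list) if start_year in c), None)
--     if s is None:
--         return []
--     e = next((i for i, c in enumerate(cycle_list) if end_year in c), None)
--     if e is None:
--         return cycle_list[s:]
--     if e < s:
--         return []
--     return cycle_list[s:e + 1]
-- ===== Notes on version B (the rewrite author's own statement) =====
-- stated objective: idiomatic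
-- what changed: Replaced the sticky-flag single-pass accumulation (append while flag set, early return at the end marker) by an index-then-slice formulation: find the first index containing start_year and the first containing end_year, then return the corresponding slice (or [] when start is missing or the end marker precedes it).
import Mathlib
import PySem

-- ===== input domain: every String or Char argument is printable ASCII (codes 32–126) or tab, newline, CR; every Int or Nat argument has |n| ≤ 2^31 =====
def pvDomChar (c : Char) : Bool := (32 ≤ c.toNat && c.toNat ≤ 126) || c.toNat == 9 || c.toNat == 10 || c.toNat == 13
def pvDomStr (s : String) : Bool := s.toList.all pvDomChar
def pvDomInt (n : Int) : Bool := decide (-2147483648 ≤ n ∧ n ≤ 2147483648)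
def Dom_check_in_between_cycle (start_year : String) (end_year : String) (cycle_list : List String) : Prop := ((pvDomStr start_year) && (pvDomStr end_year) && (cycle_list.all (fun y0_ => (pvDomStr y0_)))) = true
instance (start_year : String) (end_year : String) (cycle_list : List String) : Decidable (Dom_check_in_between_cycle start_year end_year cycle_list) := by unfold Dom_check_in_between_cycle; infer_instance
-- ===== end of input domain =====

-- B replaces A's sticky-flag accumulation loop by an index-then-slice formulation (idiomatic; same cost).


-- ===== PORT A =====
-- the for-loop with its accumulator, flag and early return, step for step
def check_in_between_cycle_go (start_year : String) (end_year : String)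
    (cycles : List String) (acc : List String) (flager : Int) : List String :=
  match cycles with
  | [] => acc
  | cycle :: rest =>
    let flager := if PySem.Str.isIn start_year cycle then 1 else flager
    let acc := if flager == 1 then acc ++ [cycle] else acc
    if PySem.Str.isIn end_year cycle then acc
    else check_in_between_cycle_go start_year end_year rest acc flager

def check_in_between_cycle (start_year : String) (end_year : String) (cycle_list : List String) : List String :=
  check_in_between_cycle_go start_year end_year cycle_list [] 0

-- ===== PORT B =====
def check_in_between_cycle_alt (start_year : String) (end_year : String) (cycle_list : List String) : List String :=
  match cycle_list.findIdx? (fun c => PySem.Str.isIn start_year c) with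
  | none => []
  | some s =>
    match cycle_list.findIdx? (fun c => PySem.Str.isIn end_year c) with
    | none => PySem.List.slice cycle_list (some (s : Int)) none
    | some e =>
      if e < s then []
      else PySem.List.slice cycle_list (some (s : Int)) (some ((e : Int) + 1))

-- ===== PRECONDITION & SPEC =====
def Spec_check_in_between_cycle (start_year : String) (end_year : String) (cycle_list : List String) (out : List String) : Prop := out = check_in_between_cycle_alt start_year end_year cycle_list
instance (start_year : String) (end_year : String) (cycle_list : List String) (out : List String) : Decidable (Spec_check_in_between_cycle start_year end_year cycle_list out) := by unfold Spec_check_in_between_cycle; infer_instance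

-- ===== CLAIM (what is proved, stated in full; the proofs are below) =====
def Claim_equal_check_in_between_cycle : Prop := ∀ (start_year : String) (end_year : String) (cycle_list : List String), Dom_check_in_between_cycle start_year end_year cycle_list → Spec_check_in_between_cycle start_year end_year cycle_list (check_in_between_cycle start_year end_year cycle_list)

-- ===== LEMMAS AND PROOFS =====

-- B's slices, rewritten on the Nat level (drop/take) via the PySem slice lemmas
theorem alt_eq (st en : String) (l : List String) :
    check_in_between_cycle_alt st en l =
      match l.findIdx? (fun c => PySem.Chars.isIn st.toList c.toList),
            l.findIdx? (fun c => PySem.Chars.isIn en.toList c.toList) with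
      | none, _ => []
      | some s, none => l.drop s
      | some s, some e => if e < s then [] else (l.drop s).take (e + 1 - s) := by
  unfold check_in_between_cycle_alt
  simp only [PySem.Str.isIn_eq]
  cases hs : l.findIdx? (fun c => PySem.Chars.isIn st.toList c.toList) with
  | none => simp
  | some s =>
    cases he : l.findIdx? (fun c => PySem.Chars.isIn en.toList c.toList) with
    | none => simp [PySem.List.slice_from_natCast]
    | some e =>
      simp only
      by_cases hlt : e < s
      · simp [hlt]
      · rw [if_neg hlt, if_neg hlt,
            show ((e : Nat) : Int) + 1 = ((e + 1 : Nat) : Int) by push_cast; ring,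
            PySem.List.slice_natCast]

-- once the flag is 1, the loop appends every cycle up to and including the first end-marker
theorem go_flag_one (st en : String) (l acc : List String) :
    check_in_between_cycle_go st en l acc 1 =
      acc ++ (match l.findIdx? (fun c => PySem.Chars.isIn en.toList c.toList) with
              | none => l
              | some e => l.take (e + 1)) := by
  induction l generalizing acc with
  | nil => simp [check_in_between_cycle_go]
  | cons c rest ih =>
    by_cases hen : PySem.Chars.isIn en.toList c.toList = true
    · simp [check_in_between_cycle_go, List.findIdx?_cons, hen]
    · have step : check_in_between_cycle_go st en (c :: rest) acc 1 =
          check_in_between_cycle_go st en rest (acc ++ [c]) 1 := by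
        simp [check_in_between_cycle_go, hen]
      rw [step, ih]
      cases h : rest.findIdx? (fun c => PySem.Chars.isIn en.toList c.toList) <;>
        simp [List.findIdx?_cons, hen, h, List.append_assoc]

theorem go_eq_alt (st en : String) (l : List String) :
    check_in_between_cycle_go st en l [] 0 = check_in_between_cycle_alt st en l := by
  rw [alt_eq]
  induction l with
  | nil => simp [check_in_between_cycle_go]
  | cons c rest ih =>
    by_cases hst : PySem.Chars.isIn st.toList c.toList = true
    · -- the start marker is in the head: the flag becomes 1
      by_cases hen : PySem.Chars.isIn en.toList c.toList = true
      · simp [check_in_between_cycle_go, List.findIdx?_cons, hst, hen]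
      · have step : check_in_between_cycle_go st en (c :: rest) [] 0 =
            check_in_between_cycle_go st en rest [c] 1 := by
          simp [check_in_between_cycle_go, hst, hen]
        rw [step, go_flag_one]
        cases h : rest.findIdx? (fun c => PySem.Chars.isIn en.toList c.toList) with
        | none => simp [List.findIdx?_cons, hst, hen, h]
        | some e => simp [List.findIdx?_cons, hst, hen, h]
    · by_cases hen : PySem.Chars.isIn en.toList c.toList = true
      · -- end marker before any start marker: A returns the (empty) accumulator
        have step : check_in_between_cycle_go st en (c :: rest) [] 0 = [] := by
          simp [check_in_between_cycle_go, hst, hen]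
        rw [step]
        cases h : rest.findIdx? (fun c => PySem.Chars.isIn st.toList c.toList) with
        | none => simp [List.findIdx?_cons, hst, hen, h]
        | some s => simp [List.findIdx?_cons, hst, hen, h]
      · -- head contains neither marker: both sides discard it
        have step : check_in_between_cycle_go st en (c :: rest) [] 0 =
            check_in_between_cycle_go st en rest [] 0 := by
          simp [check_in_between_cycle_go, hst, hen]
        rw [step, ih]
        cases hs : rest.findIdx? (fun c => PySem.Chars.isIn st.toList c.toList) with
        | none => simp [List.findIdx?_cons, hst, hen, hs]
        | some s =>
          cases he : rest.findIdx? (fun c => PySem.Chars.isIn en.toList c.toList) with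
          | none => simp [List.findIdx?_cons, hst, hen, hs, he]
          | some e =>
            simp only [List.findIdx?_cons, hst, hen, Bool.false_eq_true,
              if_false, hs, he, Option.map_some]
            by_cases hlt : e < s
            · rw [if_pos hlt, if_pos (by omega)]
            · rw [if_neg hlt, if_neg (by omega)]
              simp only [List.drop_succ_cons]
              congr 1
              omega

-- ===== VERDICT (by name: the statement is the Claim_ definition above) =====
theorem check_in_between_cycle_spec : Claim_equal_check_in_between_cycle := by
  intro st en cl _
  unfold Spec_check_in_between_cycle check_in_between_cycle
  exact go_eq_alt st en cl
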